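-- pv_equiv track=rewrite | github.com/mssdfg0708/Algorithm | Programmers/더 맵게.py | solution
-- ===== SOURCE A (Python) =====
-- import heapq
--
-- def solution(scoville, K):
--     answer = 0
--     heapq.heapify(scoville)
--     while scoville[0] < K and len(scoville) >= 2:
--         food01 = heapq.heappop(scoville)
--         food02 = heapq.heappop(scoville)
--         new_food = food01 + food02 * 2
--         heapq.heappush(scoville, new_food)
--         answer += 1
--
--     for item in scoville:
--         if item < K:
--             return -1
--     return answer
-- ===== SOURCE B (Python) =====
-- def _insert(xs, v):
--     # insert v into the sorted list xs, after any equal elements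
--     i = 0
--     while i < len(xs) and xs[i] <= v:
--         i += 1
--     xs.insert(i, v)
--
-- def solution(scoville, K):
--     xs = sorted(scoville)
--     answer = 0
--     while xs[0] < K and len(xs) >= 2:
--         a = xs.pop(0)
--         b = xs.pop(0)
--         _insert(xs, a + b * 2)
--         answer += 1
--     return answer if xs[0] >= K else -1
-- ===== Notes on version B (the rewrite author's own statement) =====
-- stated objective: alternative
-- what changed: Replaces the binary heap with a single up-front sort plus ordered re-insertion of each mixed value, and replaces the final whole-list scan by a single check of the smallest element.
import Mathlib
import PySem

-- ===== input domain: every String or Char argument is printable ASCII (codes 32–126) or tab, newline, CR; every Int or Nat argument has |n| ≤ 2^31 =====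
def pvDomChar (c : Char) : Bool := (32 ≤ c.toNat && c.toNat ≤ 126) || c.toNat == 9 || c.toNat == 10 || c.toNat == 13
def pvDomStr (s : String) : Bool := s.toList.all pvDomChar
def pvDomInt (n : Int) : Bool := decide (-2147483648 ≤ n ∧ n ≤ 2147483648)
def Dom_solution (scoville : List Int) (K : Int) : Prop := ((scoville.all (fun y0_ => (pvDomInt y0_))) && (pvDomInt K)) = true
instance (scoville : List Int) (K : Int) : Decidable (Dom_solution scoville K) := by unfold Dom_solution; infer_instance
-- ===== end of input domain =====

-- B replaces the heap with one up-front sort plus ordered re-insertion and checks only the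
-- smallest element at the end (objective: alternative). Return-value equivalence only:
-- A mutates its argument into heap order in place; B does not reproduce that mutation.

-- ===== PORT A =====
-- heapq (an opaque library call in A) is ported as a verified min-heap (a skew heap):
-- heappop yields the minimum and heappush inserts, exactly heapq's observable behaviour.
inductive Heap where
  | nil : Heap
  | node : Int → Heap → Heap → Heap
deriving DecidableEq, Repr

def Heap.size : Heap → Nat
  | .nil => 0
  | .node _ l r => l.size + r.size + 1

def Heap.toList : Heap → List Int
  | .nil => []
  | .node v l r => v :: (l.toList ++ r.toList)

-- fuel-guarded structural recursion (fuel = total size, always sufficient): pure totality guard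
def Heap.mergeF : Nat → Heap → Heap → Heap
  | _, .nil, h => h
  | _, h, .nil => h
  | 0, h, _ => h  -- fuel exhausted: unreachable, the callers pass fuel = total size
  | fuel + 1, .node a l1 r1, .node b l2 r2 =>
    if a ≤ b then .node a (Heap.mergeF fuel r1 (.node b l2 r2)) l1
    else .node b (Heap.mergeF fuel r2 (.node a l1 r1)) l2

def Heap.merge (a b : Heap) : Heap := Heap.mergeF (a.size + b.size) a b

def Heap.push (h : Heap) (x : Int) : Heap := Heap.merge h (.node x .nil .nil)

def heapifyH (xs : List Int) : Heap := xs.foldl Heap.push .nil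

-- the final 'for item in scoville: if item < K: return -1' loop
def scanA (K : Int) (items : List Int) (answer : Int) : Int :=
  match items with
  | [] => answer
  | x :: rest => if x < K then -1 else scanA K rest answer

-- the 'while scoville[0] < K and len(scoville) >= 2' loop
-- (fuel = heap size: the heap shrinks by one each iteration, so the fuel never runs out)
def loopAF (K : Int) : Nat → Heap → Int → Int
  | _, .nil, _ => -1  -- scoville[0] on an empty list raises IndexError; excluded by Pre_solution
  | 0, .node _ _ _, _ => -1  -- fuel exhausted: unreachable
  | fuel + 1, .node v l r, answer =>
    if v < K ∧ 2 ≤ (Heap.node v l r).size then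
      match Heap.merge l r with
      | .nil => -1  -- unreachable: the size guard ensures a second element exists
      | .node v2 l2 r2 =>
        loopAF K fuel (Heap.push (Heap.merge l2 r2) (v + v2 * 2)) (answer + 1)
    else scanA K (Heap.node v l r).toList answer

def loopA (K : Int) (h : Heap) (answer : Int) : Int := loopAF K h.size h answer

def solution (scoville : List Int) (K : Int) : Int :=
  loopA K (heapifyH scoville) 0

-- ===== PORT B =====
def insertSorted (xs : List Int) (v : Int) : List Int :=
  match xs with
  | [] => [v]
  | x :: rest => if x ≤ v then x :: insertSorted rest v else v :: x :: rest

-- (fuel = list length, which shrinks by one each iteration)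
def loopBF (K : Int) : Nat → List Int → Int → Int
  | _, [], _ => -1  -- xs[0] on an empty list raises IndexError; excluded by Pre_solution
  | _, [a], answer => if a < K then -1 else answer
  | 0, _ :: _ :: _, _ => -1  -- fuel exhausted: unreachable
  | fuel + 1, a :: b :: rest, answer =>
    if a < K then loopBF K fuel (insertSorted rest (a + b * 2)) (answer + 1)
    else answer

def loopB (K : Int) (xs : List Int) (answer : Int) : Int := loopBF K xs.length xs answer

def solution_alt (scoville : List Int) (K : Int) : Int :=
  loopB K (PySem.List.sorted scoville (fun x => x) false) 0

-- ===== PRECONDITION & SPEC =====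
-- Pre_ excludes only the empty list, on which A (scoville[0]) raises IndexError (and so does B).
def Pre_solution (scoville : List Int) (K : Int) : Prop := scoville ≠ []
instance (scoville : List Int) (K : Int) : Decidable (Pre_solution scoville K) := by
  unfold Pre_solution; infer_instance

def pvWitness_solution : List Int × Int := ([1, 2, 3, 9, 10, 12], 7)

def Spec_solution (scoville : List Int) (K : Int) (out : Int) : Prop := out = solution_alt scoville K
instance (scoville : List Int) (K : Int) (out : Int) : Decidable (Spec_solution scoville K out) := by unfold Spec_solution; infer_instance

-- ===== CLAIM (what is proved, stated in full; the proofs are below) =====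
def Claim_equal_solution : Prop := ∀ (scoville : List Int) (K : Int), Dom_solution scoville K → Pre_solution scoville K → Spec_solution scoville K (solution scoville K)

-- ===== LEMMAS AND PROOFS =====

theorem length_insertSorted (xs : List Int) (v : Int) :
    (insertSorted xs v).length = xs.length + 1 := by
  induction xs with
  | nil => rfl
  | cons x rest ih => simp [insertSorted]; split <;> simp [ih]

def Heap.IsHeap : Heap → Prop
  | .nil => True
  | .node v l r => (∀ x ∈ l.toList ++ r.toList, v ≤ x) ∧ l.IsHeap ∧ r.IsHeap

theorem toList_mergeF (n : Nat) : ∀ (a b : Heap), a.size + b.size ≤ n →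
    (Heap.mergeF n a b).toList.Perm (a.toList ++ b.toList) := by
  induction n with
  | zero =>
    intro a b h
    cases a with
    | nil => simp [Heap.mergeF, Heap.toList]
    | node a1 l1 r1 => simp [Heap.size] at h
  | succ n ih =>
    intro a b h
    cases a with
    | nil => simp [Heap.mergeF, Heap.toList]
    | node a1 l1 r1 =>
      cases b with
      | nil => simp [Heap.mergeF, Heap.toList]
      | node b1 l2 r2 =>
        simp only [Heap.size] at h
        rw [Heap.mergeF]
        split
        · have ih' := ih r1 (Heap.node b1 l2 r2) (by simp [Heap.size]; omega)
          rw [← Multiset.coe_eq_coe] at ih' ⊢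
          simp only [Heap.toList, List.cons_append, ← Multiset.coe_add, ← Multiset.cons_coe,
            ← Multiset.singleton_add] at ih' ⊢
          rw [ih']; abel
        · have ih' := ih r2 (Heap.node a1 l1 r1) (by simp [Heap.size]; omega)
          rw [← Multiset.coe_eq_coe] at ih' ⊢
          simp only [Heap.toList, List.cons_append, ← Multiset.coe_add, ← Multiset.cons_coe,
            ← Multiset.singleton_add] at ih' ⊢
          rw [ih']; abel

theorem toList_merge (a b : Heap) :
    (Heap.merge a b).toList.Perm (a.toList ++ b.toList) :=
  toList_mergeF _ a b le_rfl

theorem isHeap_mergeF (n : Nat) : ∀ (a b : Heap), a.size + b.size ≤ n →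
    a.IsHeap → b.IsHeap → (Heap.mergeF n a b).IsHeap := by
  induction n with
  | zero =>
    intro a b h ha hb
    cases a with
    | nil => exact hb
    | node a1 l1 r1 => simp [Heap.size] at h
  | succ n ih =>
    intro a b h ha hb
    cases a with
    | nil => exact hb
    | node a1 l1 r1 =>
      cases b with
      | nil => exact ha
      | node b1 l2 r2 =>
        simp only [Heap.size] at h
        simp only [Heap.IsHeap] at ha hb
        obtain ⟨ha1, hl1, hr1⟩ := ha
        obtain ⟨hb1, hl2, hr2⟩ := hb
        have hfuel1 : r1.size + (Heap.node b1 l2 r2).size ≤ n := by simp [Heap.size]; omega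
        have hfuel2 : r2.size + (Heap.node a1 l1 r1).size ≤ n := by simp [Heap.size]; omega
        rw [Heap.mergeF]
        split
        · rename_i hle
          refine ⟨?_, ih r1 _ hfuel1 hr1 ⟨hb1, hl2, hr2⟩, hl1⟩
          intro x hx
          rcases List.mem_append.mp hx with hx | hx
          · have hx' := (toList_mergeF n r1 _ hfuel1).mem_iff.mp hx
            rcases List.mem_append.mp hx' with h1 | h2
            · exact ha1 x (by simp [h1])
            · simp only [Heap.toList, List.mem_cons] at h2
              rcases h2 with rfl | h2
              · exact hle
              · exact le_trans hle (hb1 x h2)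
          · exact ha1 x (by simp [hx])
        · rename_i hle
          have hba : b1 ≤ a1 := le_of_not_ge hle
          refine ⟨?_, ih r2 _ hfuel2 hr2 ⟨ha1, hl1, hr1⟩, hl2⟩
          intro x hx
          rcases List.mem_append.mp hx with hx | hx
          · have hx' := (toList_mergeF n r2 _ hfuel2).mem_iff.mp hx
            rcases List.mem_append.mp hx' with h1 | h2
            · exact hb1 x (by simp [h1])
            · simp only [Heap.toList, List.mem_cons] at h2
              rcases h2 with rfl | h2
              · exact hba
              · exact le_trans hba (ha1 x h2)
          · exact hb1 x (by simp [hx])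

theorem isHeap_merge (a b : Heap) (ha : a.IsHeap) (hb : b.IsHeap) :
    (Heap.merge a b).IsHeap :=
  isHeap_mergeF _ a b le_rfl ha hb

theorem root_min (v : Int) (l r : Heap) (h : (Heap.node v l r).IsHeap) :
    ∀ x ∈ (Heap.node v l r).toList, v ≤ x := by
  intro x hx
  simp only [Heap.IsHeap] at h
  simp only [Heap.toList, List.mem_cons] at hx
  rcases hx with rfl | hx
  · exact le_refl x
  · exact h.1 x hx

theorem heapify_isHeap (xs : List Int) : (heapifyH xs).IsHeap := by
  have key : ∀ (ys : List Int) (acc : Heap), acc.IsHeap → (ys.foldl Heap.push acc).IsHeap := by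
    intro ys
    induction ys with
    | nil => intro acc h; exact h
    | cons x rest ih =>
      intro acc h
      exact ih _ (isHeap_merge _ _ h (by simp [Heap.IsHeap, Heap.toList]))
  exact key xs .nil trivial

theorem heapify_perm (xs : List Int) : (heapifyH xs).toList.Perm xs := by
  have key : ∀ (ys : List Int) (acc : Heap),
      (ys.foldl Heap.push acc).toList.Perm (acc.toList ++ ys) := by
    intro ys
    induction ys with
    | nil => intro acc; simp
    | cons x rest ih =>
      intro acc
      refine (ih _).trans ?_
      have hp := toList_merge acc (Heap.node x .nil .nil)
      rw [← Multiset.coe_eq_coe] at *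
      simp only [Heap.push, Heap.toList, List.append_nil, ← Multiset.coe_add,
        ← Multiset.cons_coe, ← Multiset.singleton_add] at *
      rw [hp]; abel
  simpa [heapifyH] using key xs .nil

theorem scanA_none (K : Int) (l : List Int) (answer : Int)
    (h : ∀ x ∈ l, ¬ x < K) : scanA K l answer = answer := by
  induction l with
  | nil => rfl
  | cons x rest ih =>
    rw [scanA, if_neg (h x (by simp))]
    exact ih (fun y hy => h y (by simp [hy]))

theorem perm_insertSorted (xs : List Int) (v : Int) :
    (insertSorted xs v).Perm (v :: xs) := by
  induction xs with
  | nil => exact List.Perm.refl _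
  | cons x rest ih =>
    simp only [insertSorted]
    split
    · rw [← Multiset.coe_eq_coe] at *
      simp only [← Multiset.cons_coe, ← Multiset.singleton_add] at *
      rw [ih]; abel
    · exact List.Perm.refl _

theorem pairwise_insertSorted (xs : List Int) (v : Int)
    (h : xs.Pairwise (· ≤ ·)) : (insertSorted xs v).Pairwise (· ≤ ·) := by
  induction xs with
  | nil => simp [insertSorted]
  | cons x rest ih =>
    rcases List.pairwise_cons.mp h with ⟨hx, hrest⟩
    simp only [insertSorted]
    split
    · rename_i hxv
      refine List.pairwise_cons.mpr ⟨?_, ih hrest⟩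
      intro y hy
      have hy' := (perm_insertSorted rest v).mem_iff.mp hy
      rcases List.mem_cons.mp hy' with rfl | hy''
      · exact hxv
      · exact hx y hy''
    · rename_i hxv
      have hvx : v ≤ x := le_of_lt (lt_of_not_ge hxv)
      refine List.pairwise_cons.mpr ⟨?_, h⟩
      intro y hy
      rcases List.mem_cons.mp hy with rfl | hy'
      · exact hvx
      · exact le_trans hvx (hx y hy')

theorem length_toList (h : Heap) : h.toList.length = h.size := by
  induction h with
  | nil => rfl
  | node v l r ihl ihr => simp [Heap.toList, Heap.size, ihl, ihr]

theorem loop_eq (K : Int) (n : Nat) : ∀ (h : Heap) (xs : List Int) (answer : Int),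
    h.size ≤ n → h.IsHeap → xs.Pairwise (· ≤ ·) → h.toList.Perm xs →
    loopAF K n h answer = loopBF K n xs answer := by
  induction n with
  | zero =>
    intro h xs answer hsz _ _ hperm
    cases h with
    | node v l r => simp [Heap.size] at hsz
    | nil =>
      have hxs : xs = [] := by
        have hl := hperm.length_eq
        simp only [Heap.toList, List.length_nil] at hl
        exact List.eq_nil_of_length_eq_zero hl.symm
      subst hxs
      rfl
  | succ n IH =>
    intro h xs answer hsz hheap hsort hperm
    cases h with
    | nil =>
      have hxs : xs = [] := by
        have hl := hperm.length_eq
        simp only [Heap.toList, List.length_nil] at hl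
        exact List.eq_nil_of_length_eq_zero hl.symm
      subst hxs
      rfl
    | node v l r =>
      have hlen : xs.length = l.size + r.size + 1 := by
        have hl := hperm.length_eq
        simpa [length_toList, Heap.size] using hl.symm
      cases xs with
      | nil => simp at hlen
      | cons a t =>
        have hmin : ∀ x ∈ a :: t, a ≤ x := by
          intro x hx
          rcases List.mem_cons.mp hx with rfl | hx'
          · exact le_refl x
          · exact (List.pairwise_cons.mp hsort).1 x hx'
        have hva : v = a := by
          have h1 : v ≤ a := root_min v l r hheap a (hperm.mem_iff.mpr (by simp))
          have h2 : a ≤ v := hmin v (hperm.mem_iff.mp (by simp [Heap.toList]))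
          omega
        subst hva
        cases t with
        | nil =>
          have hsz1 : l.size + r.size = 0 := by
            simp only [List.length_cons, List.length_nil] at hlen
            omega
          have hcond : ¬ (v < K ∧ 2 ≤ (Heap.node v l r).size) := by
            simp only [Heap.size]; omega
          have hl0 : l.toList = [] :=
            List.eq_nil_of_length_eq_zero (by rw [length_toList]; omega)
          have hr0 : r.toList = [] :=
            List.eq_nil_of_length_eq_zero (by rw [length_toList]; omega)
          rw [loopAF, if_neg hcond]
          simp [Heap.toList, hl0, hr0, scanA, loopBF]
        | cons b t2 =>
          obtain ⟨hmem, hl, hr⟩ :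
              (∀ x ∈ l.toList ++ r.toList, v ≤ x) ∧ l.IsHeap ∧ r.IsHeap := hheap
          have htail : (l.toList ++ r.toList).Perm (b :: t2) :=
            (List.perm_cons v).mp (by simpa [Heap.toList] using hperm)
          have hmrg := toList_merge l r
          have hmheap := isHeap_merge l r hl hr
          by_cases hK : v < K
          · have hcond : v < K ∧ 2 ≤ (Heap.node v l r).size := by
              refine ⟨hK, ?_⟩
              simp only [Heap.size]
              simp only [List.length_cons] at hlen
              omega
            rw [loopAF, if_pos hcond]
            split
            · rename_i heq
              rw [heq] at hmrg
              have h1 := hmrg.length_eq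
              have h2 := htail.length_eq
              simp only [Heap.toList, List.length_nil, List.length_cons] at h1 h2
              omega
            · rename_i v2 l2 r2 heq
              rw [heq] at hmrg hmheap
              have hmrg2 : (v2 :: (l2.toList ++ r2.toList)).Perm (b :: t2) := by
                have := hmrg.trans htail
                simpa [Heap.toList] using this
              have hsort2 : (b :: t2).Pairwise (· ≤ ·) := (List.pairwise_cons.mp hsort).2
              have hminb : ∀ x ∈ b :: t2, b ≤ x := by
                intro x hx
                rcases List.mem_cons.mp hx with rfl | hx'
                · exact le_refl x
                · exact (List.pairwise_cons.mp hsort2).1 x hx'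
              have hv2b : v2 = b := by
                have h1 : v2 ≤ b := root_min v2 l2 r2 hmheap b (by
                  have hb : b ∈ v2 :: (l2.toList ++ r2.toList) := hmrg2.mem_iff.mpr (by simp)
                  simpa [Heap.toList] using hb)
                have h2 : b ≤ v2 := hminb v2 (hmrg2.mem_iff.mp (by simp))
                omega
              subst hv2b
              have htail2 : (l2.toList ++ r2.toList).Perm t2 := (List.perm_cons v2).mp hmrg2
              obtain ⟨hmem2, hl2, hr2⟩ :
                  (∀ x ∈ l2.toList ++ r2.toList, v2 ≤ x) ∧ l2.IsHeap ∧ r2.IsHeap := hmheap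
              have hpush : (Heap.push (Heap.merge l2 r2) (v + v2 * 2)).toList.Perm
                  (insertSorted t2 (v + v2 * 2)) := by
                have hp1 := toList_merge (Heap.merge l2 r2) (Heap.node (v + v2 * 2) .nil .nil)
                have hp2 := toList_merge l2 r2
                have hp3 := perm_insertSorted t2 (v + v2 * 2)
                rw [← Multiset.coe_eq_coe] at hp1 hp2 hp3 htail2 ⊢
                simp only [Heap.push, Heap.toList, List.append_nil, ← Multiset.coe_add,
                  ← Multiset.cons_coe, ← Multiset.singleton_add] at hp1 hp2 hp3 htail2 ⊢
                rw [hp1, hp2, hp3, htail2]; abel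
              have hheap' : (Heap.push (Heap.merge l2 r2) (v + v2 * 2)).IsHeap :=
                isHeap_merge _ _ (isHeap_merge l2 r2 hl2 hr2)
                  (by simp [Heap.IsHeap, Heap.toList])
              have hsort' := pairwise_insertSorted t2 (v + v2 * 2)
                (List.pairwise_cons.mp hsort2).2
              have hsizele : (Heap.push (Heap.merge l2 r2) (v + v2 * 2)).size ≤ n := by
                have he1 := hpush.length_eq
                rw [length_toList, length_insertSorted] at he1
                have he2 := htail2.length_eq
                simp only [List.length_append] at he2
                simp only [Heap.size] at hsz
                simp only [List.length_cons] at hlen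
                omega
              rw [loopBF, if_pos hK]
              exact IH _ _ _ hsizele hheap' hsort' hpush
          · have hcond : ¬ (v < K ∧ 2 ≤ (Heap.node v l r).size) := by
              intro hc; exact hK hc.1
            rw [loopAF, if_neg hcond]
            have hscan : scanA K (Heap.node v l r).toList answer = answer := by
              refine scanA_none K _ answer ?_
              intro x hx
              have hvx := hmin x (hperm.mem_iff.mp hx)
              omega
            rw [hscan, loopBF]
            simp [hK]

-- ===== VERDICT (by name: the statement is the Claim_ definition above) =====
theorem solution_spec : Claim_equal_solution := by
  intro scoville K _ hpre
  unfold Spec_solution solution solution_alt loopA loopB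
  have hlen : (PySem.List.sorted scoville (fun x => x) false).length = (heapifyH scoville).size := by
    rw [← length_toList]
    exact ((PySem.List.sorted_perm scoville (fun x => x) false).trans
      (heapify_perm scoville).symm).length_eq
  rw [hlen]
  exact loop_eq K (heapifyH scoville).size (heapifyH scoville) _ 0 le_rfl
    (heapify_isHeap scoville)
    (by simpa using PySem.List.sorted_pairwise scoville (fun x => x))
    ((heapify_perm scoville).trans (PySem.List.sorted_perm scoville (fun x => x) false).symm)
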